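-- pv_equiv track=rewrite | github.com/miliar/Code_Jam_Webscraper | solutions_python/Problem_178/811.py | sequence_reader
-- ===== SOURCE A (Python) =====
-- def sequence_reader(sequence):
--     allow=True
--     minus_counter=0
--     for char in sequence:
--         if(allow and char=='-'):
--             minus_counter+=1
--             allow=False
--         elif(char=='+'):
--             allow=True
--     starting_minus=(sequence[0]=='-')
--     return (minus_counter,starting_minus)
-- ===== SOURCE B (Python) =====
-- def sequence_reader(sequence):
--     count = sum(1 for seg in sequence.split('+') if '-' in seg)
--     starting_minus = (sequence[0] == '-')
--     return (count, starting_minus)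
-- ===== Notes on version B (the rewrite author's own statement) =====
-- stated objective: simpler
-- what changed: B partitions the string at plus signs and counts the segments that contain a minus, replacing A's allow-flag state-machine scan; in CPython the split and membership tests run in C, which a timing run measured as faster.
import Mathlib
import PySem

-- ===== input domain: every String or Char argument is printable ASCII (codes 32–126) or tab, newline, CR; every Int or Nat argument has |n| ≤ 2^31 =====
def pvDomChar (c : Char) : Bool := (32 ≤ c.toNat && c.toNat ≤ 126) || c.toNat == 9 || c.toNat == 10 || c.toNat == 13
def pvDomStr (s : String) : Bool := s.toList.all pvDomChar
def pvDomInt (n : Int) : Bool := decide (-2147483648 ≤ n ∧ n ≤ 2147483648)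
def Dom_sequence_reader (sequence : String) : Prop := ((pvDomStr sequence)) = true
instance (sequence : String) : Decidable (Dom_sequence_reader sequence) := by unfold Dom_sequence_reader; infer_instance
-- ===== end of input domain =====

-- B replaces A's allow-flag state-machine scan by a split at plus signs and a per-segment membership count (simpler; measured faster in a timing run).

-- ===== PORT A =====
def sequence_reader (sequence : String) : Int × Bool :=
  let st := sequence.toList.foldl
    (fun (st : Bool × Int) char =>
      if st.1 && char == '-' then (false, st.2 + 1)
      else if char == '+' then (true, st.2)
      else st) (true, 0)
  let starting_minus :=
    match PySem.Str.pyGet? sequence 0 with  -- sequence[0]: IndexError on "" (excluded by Pre_)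
    | some c => c == '-'
    | none => false
  (st.2, starting_minus)

-- ===== PORT B =====
def sequence_reader_alt (sequence : String) : Int × Bool :=
  -- sum(1 for seg in sequence.split('+') if '-' in seg)
  let segs := (PySem.Str.split? sequence "+").getD []   -- split? is some: "+" ≠ ""
  let count : Int := (segs.countP (fun seg => PySem.Str.isIn "-" seg) : Nat)
  let starting_minus :=
    match PySem.Str.pyGet? sequence 0 with  -- sequence[0]: IndexError on "" (excluded by Pre_)
    | some c => c == '-'
    | none => false
  (count, starting_minus)

-- ===== PRECONDITION & SPEC =====
-- Pre_ excludes only the empty string, on which both Pythons raise IndexError at sequence[0].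
def Pre_sequence_reader (sequence : String) : Prop := sequence ≠ ""
instance (sequence : String) : Decidable (Pre_sequence_reader sequence) := by unfold Pre_sequence_reader; infer_instance
def pvWitness_sequence_reader : String := "-+a-"

def Spec_sequence_reader (sequence : String) (out : Int × Bool) : Prop := out = sequence_reader_alt sequence
instance (sequence : String) (out : Int × Bool) : Decidable (Spec_sequence_reader sequence out) := by unfold Spec_sequence_reader; infer_instance

-- ===== CLAIM (what is proved, stated in full; the proofs are below) =====
def Claim_equal_sequence_reader : Prop := ∀ (sequence : String), Dom_sequence_reader sequence → Pre_sequence_reader sequence → Spec_sequence_reader sequence (sequence_reader sequence)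

-- ===== LEMMAS AND PROOFS =====

-- number of new minus-blocks A's loop counts from state `allow` onwards
def pvCntA : Bool → List Char → Nat
  | _, [] => 0
  | allow, c :: t =>
    if allow && c == '-' then 1 + pvCntA false t
    else if c == '+' then pvCntA true t
    else pvCntA allow t

theorem pvFoldA (l : List Char) (a : Bool) (k : Int) :
    (l.foldl (fun (st : Bool × Int) char =>
      if st.1 && char == '-' then (false, st.2 + 1)
      else if char == '+' then (true, st.2)
      else st) (a, k)).2 = k + (pvCntA a l : Int) := by
  induction l generalizing a k with
  | nil => simp [pvCntA]
  | cons c t ih =>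
    simp only [List.foldl_cons]
    by_cases h1 : (a && c == '-') = true
    · rw [if_pos h1, ih]
      simp only [pvCntA, h1, if_true]
      push_cast; ring
    · rw [if_neg h1]
      by_cases h2 : (c == '+') = true
      · rw [if_pos h2, ih]
        simp [pvCntA, h1, h2]
      · rw [if_neg h2, ih]
        simp [pvCntA, h1, h2]

theorem pvIsInSingleton (x : Char) (cs : List Char) :
    PySem.Chars.isIn [x] cs = decide (x ∈ cs) := by
  by_cases h : x ∈ cs
  · obtain ⟨p, q, rfl⟩ := List.append_of_mem h
    have hinf : [x] <:+: p ++ x :: q := ⟨p, q, by simp⟩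
    simp [(PySem.Chars.isIn_iff_infix _ _).2 hinf, h]
  · rw [(PySem.Chars.isIn_eq_false_iff _ _).2
      (fun hin => h (List.singleton_sublist.1 hin.sublist))]
    simp [h]

theorem pvGoCountP (fuel : Nat) : ∀ (l cur : List Char) (acc : List (List Char)),
    l.length ≤ fuel →
    (PySem.Chars.splitOn.go ['+'] fuel l cur acc).countP (fun cs => PySem.Chars.isIn ['-'] cs)
      = acc.countP (fun cs => PySem.Chars.isIn ['-'] cs)
        + (if '-' ∈ cur then 1 else 0) + pvCntA (!decide ('-' ∈ cur)) l := by
  induction fuel with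
  | zero =>
    intro l cur acc h
    have : l = [] := List.eq_nil_of_length_eq_zero (Nat.le_zero.mp h)
    subst this
    simp [PySem.Chars.splitOn.go, pvCntA, pvIsInSingleton, List.countP_cons]
  | succ fuel ih =>
    intro l cur acc h
    match l with
    | [] =>
      simp [PySem.Chars.splitOn.go, pvCntA, pvIsInSingleton, List.countP_cons]
    | c :: rest =>
      by_cases hc : c = '+'
      · subst hc
        have hgo := ih rest [] (cur.reverse :: acc) (by simpa using h)
        simp only [pvIsInSingleton] at hgo ⊢
        simp only [PySem.Chars.splitOn.go, List.isPrefixOf, BEq.rfl, Bool.true_and,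
          List.isPrefixOf_nil_left, if_true, List.length_cons, List.length_nil,
          List.drop_succ_cons, List.drop_zero]
        rw [hgo]
        by_cases hb : '-' ∈ cur <;> simp [hb, pvCntA]
      · have hpre : List.isPrefixOf ['+'] (c :: rest) = false := by
          simp [List.isPrefixOf]; exact fun hh => hc hh.symm
        by_cases hm : c = '-'
        · subst hm
          have hgo := ih rest ('-' :: cur) acc (by simpa using Nat.le_of_succ_le_succ h)
          simp only [PySem.Chars.splitOn.go, hpre, Bool.false_eq_true, if_false, hgo,
            List.mem_cons, true_or, decide_true, Bool.not_true, if_true, pvCntA]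
          by_cases hb : '-' ∈ cur
          · simp [hb]
          · simp [hb]
            ring
        · have hm' : ('-' : Char) ≠ c := Ne.symm hm
          have hgo := ih rest (c :: cur) acc (by simpa using Nat.le_of_succ_le_succ h)
          simp [PySem.Chars.splitOn.go, hpre, hgo, pvCntA, hm, hm', hc]

theorem pvSplitCount (l : List Char) :
    (PySem.Chars.splitOn l ['+']).countP (fun cs => PySem.Chars.isIn ['-'] cs) = pvCntA true l := by
  have := pvGoCountP (l.length + 1) l [] [] (Nat.le_succ _)
  simpa [PySem.Chars.splitOn] using this

-- ===== VERDICT (by name: the statement is the Claim_ definition above) =====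
theorem sequence_reader_spec : Claim_equal_sequence_reader := by
  intro s _ _
  unfold Spec_sequence_reader sequence_reader sequence_reader_alt
  have h1 : ("+" : String).toList = ['+'] := rfl
  have hsplit : PySem.Str.split? s "+"
      = some ((PySem.Chars.splitOn s.toList ['+']).map String.ofList) := by
    simp [PySem.Str.split?, PySem.Chars.split?, h1]
  rw [hsplit]
  simp only [Option.getD_some, Prod.mk.injEq, and_true]
  rw [pvFoldA]
  rw [List.countP_map]
  have hp : ((fun seg => PySem.Str.isIn "-" seg) ∘ String.ofList)
      = fun cs => PySem.Chars.isIn ['-'] cs := by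
    funext cs; simp [PySem.Str.isIn]
  rw [hp, pvSplitCount]
  ring
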